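-- pv_equiv track=rewrite | github.com/opencobra/optlang | optlang/interface/trackers/base.py | _iter_unique
-- ===== SOURCE A (Python) =====
-- def _iter_unique(iterable):
--     seen = set()
--     for obj in reversed(iterable):
--         if obj in seen:
--             continue
--         yield obj
--         seen.add(obj)
--     iterable.clear()
-- ===== SOURCE B (Python) =====
-- def _iter_unique(iterable):
--     # Keep each element iff it is the LAST occurrence of its value (no equal
--     # element in the remaining suffix), then emit those kept elements in
--     # reverse: this equals the reverse-order first-seen dedup, with no seen-set.
--     kept = [x for i, x in enumerate(iterable) if x not in iterable[i + 1:]]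
--     for obj in reversed(kept):
--         yield obj
--     iterable.clear()
-- ===== Notes on version B (the rewrite author's own statement) =====
-- stated objective: alternative
-- what changed: Replaces the reversed scan with a mutable seen-set by a forward last-occurrence filter (keep x iff x does not occur in the remaining suffix iterable[i+1:]) followed by a reverse; no auxiliary set is maintained.
import Mathlib
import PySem

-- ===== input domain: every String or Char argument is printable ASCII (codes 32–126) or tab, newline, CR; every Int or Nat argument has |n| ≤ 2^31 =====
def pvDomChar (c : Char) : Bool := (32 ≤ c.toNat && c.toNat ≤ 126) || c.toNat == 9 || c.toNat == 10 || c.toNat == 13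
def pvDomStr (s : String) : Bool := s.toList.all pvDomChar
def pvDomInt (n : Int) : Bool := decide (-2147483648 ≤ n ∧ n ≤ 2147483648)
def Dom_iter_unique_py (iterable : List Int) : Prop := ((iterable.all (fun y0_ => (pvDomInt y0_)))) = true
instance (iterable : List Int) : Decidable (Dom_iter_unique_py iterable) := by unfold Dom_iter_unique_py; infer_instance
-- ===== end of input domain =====

-- ===== PORT A =====
-- B replaces A's reversed scan with a seen-set by a forward last-occurrence filter
-- followed by a reverse (alternative decomposition, no auxiliary set); both Pythons
-- clear the argument after yielding, so the mutation side effect is identical;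
-- the equivalence proved here is about the list of yielded values.
def iter_unique_py (iterable : List Int) : List Int :=
  (iterable.reverse.foldl
    (fun (st : List Int × PySem.Set Int) obj =>
      if PySem.Set.contains st.2 obj then st
      else (st.1 ++ [obj], PySem.Set.add st.2 obj))
    ([], PySem.Set.empty)).1

-- ===== PORT B =====
-- kept = [x for i, x in enumerate(iterable) if x not in iterable[i + 1:]]; reversed(kept)
def iter_unique_py_alt (iterable : List Int) : List Int :=
  (((PySem.List.enumerate iterable).filter
      (fun p => ! (PySem.List.slice iterable (some (p.1 + 1)) none).contains p.2)).map
    (·.2)).reverse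

-- ===== PRECONDITION & SPEC =====
def Spec_iter_unique_py (iterable : List Int) (out : List Int) : Prop := out = iter_unique_py_alt iterable
instance (iterable : List Int) (out : List Int) : Decidable (Spec_iter_unique_py iterable out) := by unfold Spec_iter_unique_py; infer_instance

-- ===== CLAIM (what is proved, stated in full; the proofs are below) =====
def Claim_equal_iter_unique_py : Prop := ∀ (iterable : List Int), Dom_iter_unique_py iterable → Spec_iter_unique_py iterable (iter_unique_py iterable)

-- ===== LEMMAS AND PROOFS =====

-- Reference form of B's filter: keep an element iff it does not occur in the rest.
def keepLast : List Int → List Int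
  | [] => []
  | x :: xs => if x ∈ xs then keepLast xs else x :: keepLast xs

theorem mem_keepLast (y : Int) (l : List Int) : y ∈ keepLast l ↔ y ∈ l := by
  induction l with
  | nil => simp [keepLast]
  | cons x xs ih =>
    by_cases h : x ∈ xs
    · rw [keepLast, if_pos h, ih]
      constructor
      · exact fun hy => List.mem_cons_of_mem _ hy
      · intro hy
        rcases List.mem_cons.mp hy with rfl | hy
        · exact h
        · exact hy
    · rw [keepLast, if_neg h]
      simp [ih]

-- B's enumerate/slice comprehension computes keepLast (generalized over a consumed prefix).
theorem filter_enumerate_eq_keepLast (xs pre : List Int) :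
    ((PySem.List.enumerate xs (pre.length : Int)).filter
        (fun p => ! (PySem.List.slice (pre ++ xs) (some (p.1 + 1)) none).contains p.2)).map
      (·.2) = keepLast xs := by
  induction xs generalizing pre with
  | nil => rfl
  | cons x xs ih =>
    rw [PySem.List.enumerate_cons]
    have hone : (pre.length : Int) + 1 = ((pre.length + 1 : Nat) : Int) := by push_cast; ring
    have hslice : PySem.List.slice (pre ++ x :: xs) (some ((pre.length : Int) + 1)) none = xs := by
      rw [hone, PySem.List.slice_from_natCast]
      simp [List.drop_append]
    have htail :
        ((PySem.List.enumerate xs ((pre.length : Int) + 1)).filter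
            (fun p => ! (PySem.List.slice (pre ++ x :: xs) (some (p.1 + 1)) none).contains p.2)).map
          (·.2) = keepLast xs := by
      have hlen : (pre.length : Int) + 1 = (((pre ++ [x]).length : Nat) : Int) := by
        simp
      have happ : pre ++ x :: xs = (pre ++ [x]) ++ xs := by simp
      rw [hlen, happ]
      exact ih (pre ++ [x])
    by_cases h : x ∈ xs
    · have hc : xs.contains x = true := by simpa using h
      simp only [List.filter_cons, hslice, hc, Bool.not_true, Bool.false_eq_true, if_false]
      simp only [keepLast, if_pos h]
      exact htail
    · have hc : xs.contains x = false := by simpa using h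
      simp only [List.filter_cons, hslice, hc, Bool.not_false, if_true, List.map_cons]
      simp only [keepLast, if_neg h]
      rw [htail]

-- A's fold keeps its output list and its seen-set in lock step.
theorem iter_unique_fold_eq (l : List Int) (s : List Int) :
    (l.foldl
      (fun (st : List Int × PySem.Set Int) obj =>
        if PySem.Set.contains st.2 obj then st
        else (st.1 ++ [obj], PySem.Set.add st.2 obj))
      (s, s)).1 = l.foldl PySem.Set.add s := by
  induction l generalizing s with
  | nil => rfl
  | cons x xs ih =>
    simp only [List.foldl_cons]
    have hadd : PySem.Set.add s x = if PySem.Set.contains s x then s else s ++ [x] := rfl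
    by_cases h : PySem.Set.contains s x
    · rw [hadd, if_pos h, if_pos h]; exact ih s
    · rw [hadd, if_neg h, if_neg h]; exact ih (s ++ [x])

-- first-seen dedup of the reversed list = reverse of the last-occurrence filter
theorem foldl_add_reverse_eq (l : List Int) :
    l.reverse.foldl PySem.Set.add ([] : PySem.Set Int) = (keepLast l).reverse := by
  induction l with
  | nil => rfl
  | cons x xs ih =>
    rw [List.reverse_cons, List.foldl_append, ih]
    simp only [List.foldl_cons, List.foldl_nil]
    by_cases h : x ∈ xs
    · simp only [keepLast, if_pos h]
      simp [PySem.Set.add, (mem_keepLast x xs).mpr h]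
    · simp only [keepLast, if_neg h, List.reverse_cons]
      have hc : x ∉ keepLast xs := fun hx => h ((mem_keepLast x xs).mp hx)
      simp [PySem.Set.add, hc]

-- ===== VERDICT (by name: the statement is the Claim_ definition above) =====
theorem iter_unique_py_spec : Claim_equal_iter_unique_py := by
  intro iterable _
  show iter_unique_py iterable = iter_unique_py_alt iterable
  unfold iter_unique_py iter_unique_py_alt
  have h0 : (PySem.Set.empty : PySem.Set Int) = [] := rfl
  rw [h0, iter_unique_fold_eq iterable.reverse [], foldl_add_reverse_eq]
  congr 1
  have := filter_enumerate_eq_keepLast iterable []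
  simpa using this.symm
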